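-- pv_equiv track=rewrite | github.com/PrimerAI/pointer-generator | language_check.py | has_poor_grammar
-- ===== SOURCE A (Python) =====
-- def has_poor_grammar(token_strings):
--     """
--     Returns whether the output has an odd number of double quotes or if it does not have balanced
--     parentheses.
--     """
--     has_open_left_parens = False
--     quote_count = 0
--
--     for token in token_strings:
--         if token == '(':
--             if has_open_left_parens:
--                 return True
--             else:
--                 has_open_left_parens = True
--         elif token == ')':
--             if has_open_left_parens:
--                 has_open_left_parens = False
--             else:
--                 return True
--         elif token == '"':
--             quote_count += 1
--
--     return quote_count % 2 == 1 or has_open_left_parens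
-- ===== SOURCE B (Python) =====
-- def has_poor_grammar(token_strings):
--     parens = []
--     quotes = 0
--     for token in token_strings:
--         if token in ('(', ')'):
--             parens.append(token)
--         elif token == '"':
--             quotes += 1
--     return quotes % 2 == 1 or parens != ['(', ')'] * (len(parens) // 2)
-- ===== Notes on version B (the rewrite author's own statement) =====
-- stated objective: alternative
-- what changed: Replaces the early-return state machine (an open-paren flag updated token by token) with a single gathering pass followed by a whole-sequence check: the collected paren tokens must equal the flat alternating open-close pattern of matching length, exploiting that the flag logic accepts exactly the alternating sequences.
import Mathlib
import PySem

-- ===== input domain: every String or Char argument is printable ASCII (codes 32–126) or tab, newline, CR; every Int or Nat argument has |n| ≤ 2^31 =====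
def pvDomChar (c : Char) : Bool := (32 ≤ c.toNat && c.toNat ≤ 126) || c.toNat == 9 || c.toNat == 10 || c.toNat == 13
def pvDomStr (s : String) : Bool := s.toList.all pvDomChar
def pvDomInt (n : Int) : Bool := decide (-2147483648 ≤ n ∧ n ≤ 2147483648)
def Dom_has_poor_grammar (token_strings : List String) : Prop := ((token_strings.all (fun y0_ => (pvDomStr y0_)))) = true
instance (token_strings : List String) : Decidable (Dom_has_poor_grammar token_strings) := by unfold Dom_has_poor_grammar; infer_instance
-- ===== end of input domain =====

-- B replaces A's early-return open-paren state machine by one gathering pass plus a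
-- whole-sequence comparison of the collected parens against the flat pattern ['(',')'] * k
-- (alternative decomposition, same O(n) cost).


-- ===== PORT A =====
-- the for-loop of A with its early returns, as a structural recursion over the
-- remaining tokens and the loop state (has_open_left_parens, quote_count)
def hpgLoopA : List String → Bool → Nat → Bool
  | [], opn, qc => (qc % 2 == 1) || opn
  | t :: ts, opn, qc =>
    if t = "(" then
      if opn then true else hpgLoopA ts true qc
    else if t = ")" then
      if opn then hpgLoopA ts false qc else true
    else if t = "\"" then
      hpgLoopA ts opn (qc + 1)
    else
      hpgLoopA ts opn qc

def has_poor_grammar (token_strings : List String) : Bool :=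
  hpgLoopA token_strings false 0

-- ===== PORT B =====
-- one pass collecting the paren tokens and counting quotes
def hpgAltStep (st : List String × Nat) (t : String) : List String × Nat :=
  if t = "(" || t = ")" then (st.1 ++ [t], st.2)
  else if t = "\"" then (st.1, st.2 + 1)
  else st

def has_poor_grammar_alt (token_strings : List String) : Bool :=
  let st := token_strings.foldl hpgAltStep ([], 0)
  (st.2 % 2 == 1) || decide (st.1 ≠ (List.replicate (st.1.length / 2) ["(", ")"]).flatten)

-- ===== PRECONDITION & SPEC =====
def Spec_has_poor_grammar (token_strings : List String) (out : Bool) : Prop := out = has_poor_grammar_alt token_strings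
instance (token_strings : List String) (out : Bool) : Decidable (Spec_has_poor_grammar token_strings out) := by unfold Spec_has_poor_grammar; infer_instance

-- ===== CLAIM (what is proved, stated in full; the proofs are below) =====
def Claim_equal_has_poor_grammar : Prop := ∀ (token_strings : List String), Dom_has_poor_grammar token_strings → Spec_has_poor_grammar token_strings (has_poor_grammar token_strings)

-- ===== LEMMAS AND PROOFS =====

-- the paren tokens of the input, and its number of quote tokens
def hpgParens : List String → List String
  | [] => []
  | t :: ts => if t = "(" || t = ")" then t :: hpgParens ts else hpgParens ts

def hpgQuotes : List String → Nat
  | [] => 0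
  | t :: ts => (if t = "\"" then 1 else 0) + hpgQuotes ts

-- acceptance of a pure paren sequence by A's flag machine (no early return, flag ends false)
def hpgAcc : Bool → List String → Bool
  | b, [] => !b
  | b, t :: ts => if t = "(" then (if b then false else hpgAcc true ts)
                  else if b then hpgAcc false ts else false

def hpgAlt (k : Nat) : List String := (List.replicate k ["(", ")"]).flatten

theorem hpgAlt_succ (k : Nat) : hpgAlt (k+1) = "(" :: ")" :: hpgAlt k := by
  simp [hpgAlt, List.replicate_succ]

theorem hpgAlt_length (k : Nat) : (hpgAlt k).length = 2 * k := by
  induction k with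
  | zero => rfl
  | succ k ih => simp [hpgAlt_succ, ih]; omega

-- foldl of B's step computes (collected parens, quote count)
theorem hpgFold_spec (ts : List String) (p : List String) (q : Nat) :
    ts.foldl hpgAltStep (p, q) = (p ++ hpgParens ts, q + hpgQuotes ts) := by
  induction ts generalizing p q with
  | nil => simp [hpgParens, hpgQuotes]
  | cons t ts ih =>
    simp only [List.foldl_cons, hpgAltStep, hpgParens, hpgQuotes]
    by_cases h1 : t = "(" <;> by_cases h2 : t = ")" <;> by_cases h3 : t = "\"" <;>
      simp_all <;> omega

-- hpgParens contains only paren tokens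
theorem hpgParens_mem (ts : List String) (t : String) (h : t ∈ hpgParens ts) :
    t = "(" ∨ t = ")" := by
  induction ts with
  | nil => simp [hpgParens] at h
  | cons u us ih =>
    simp only [hpgParens] at h
    split at h
    · rename_i hu
      rw [List.mem_cons] at h
      rcases h with rfl | h
      · simpa using hu
      · exact ih h
    · exact ih h

theorem hpgAcc_nil (b : Bool) : hpgAcc b [] = !b := rfl

theorem hpgAcc_true_l (ts : List String) : hpgAcc true ("(" :: ts) = false := by simp [hpgAcc]
theorem hpgAcc_false_l (ts : List String) : hpgAcc false ("(" :: ts) = hpgAcc true ts := by simp [hpgAcc]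
theorem hpgAcc_true_r (ts : List String) : hpgAcc true (")" :: ts) = hpgAcc false ts := by simp [hpgAcc]
theorem hpgAcc_false_r (ts : List String) : hpgAcc false (")" :: ts) = false := by simp [hpgAcc]

-- characterisation of the two machine states on paren-only sequences
theorem hpgAcc_false_iff (ps : List String) (hps : ∀ t ∈ ps, t = "(" ∨ t = ")") :
    (hpgAcc false ps = true ↔ ∃ k, ps = hpgAlt k) ∧
    (hpgAcc true ps = true ↔ ∃ k, ps = ")" :: hpgAlt k) := by
  induction ps with
  | nil =>
    constructor
    · simp only [hpgAcc_nil]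
      constructor
      · intro _; exact ⟨0, rfl⟩
      · intro _; rfl
    · simp [hpgAcc_nil]
  | cons t ts ih =>
    have hmem : ∀ u ∈ ts, u = "(" ∨ u = ")" := fun u hu => hps u (List.mem_cons_of_mem _ hu)
    obtain ⟨ihF, ihT⟩ := ih hmem
    rcases hps t List.mem_cons_self with rfl | rfl
    · constructor
      · rw [hpgAcc_false_l, ihT]
        constructor
        · rintro ⟨k, rfl⟩; exact ⟨k+1, by simp [hpgAlt_succ]⟩
        · rintro ⟨k, hk⟩
          cases k with
          | zero => simp [hpgAlt] at hk
          | succ k =>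
            rw [hpgAlt_succ] at hk
            exact ⟨k, by simpa using hk⟩
      · rw [hpgAcc_true_l]
        constructor
        · intro h; exact absurd h (by simp)
        · rintro ⟨k, hk⟩; exact absurd hk (by simp)
    · constructor
      · rw [hpgAcc_false_r]
        constructor
        · intro h; exact absurd h (by simp)
        · rintro ⟨k, hk⟩
          cases k with
          | zero => simp [hpgAlt] at hk
          | succ k => rw [hpgAlt_succ] at hk; injection hk with h _; exact absurd h (by decide)
      · rw [hpgAcc_true_r, ihF]
        constructor
        · rintro ⟨k, rfl⟩; exact ⟨k, rfl⟩
        · rintro ⟨k, hk⟩; exact ⟨k, by simpa using hk⟩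

-- A's loop in terms of the paren subsequence and the quote count
theorem hpgLoopA_spec (ts : List String) (b : Bool) (qc : Nat) :
    hpgLoopA ts b qc = (!(hpgAcc b (hpgParens ts)) || ((qc + hpgQuotes ts) % 2 == 1)) := by
  induction ts generalizing b qc with
  | nil => cases b <;> simp [hpgLoopA, hpgParens, hpgQuotes, hpgAcc_nil]
  | cons t ts ih =>
    simp only [hpgLoopA, hpgParens, hpgQuotes]
    by_cases h1 : t = "("
    · subst h1
      cases b <;> simp [hpgAcc_true_l, hpgAcc_false_l, ih]
    · by_cases h2 : t = ")"
      · subst h2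
        cases b <;> simp [hpgAcc_true_r, hpgAcc_false_r, h1, ih]
      · by_cases h3 : t = "\""
        · subst h3
          simp only [if_neg h1, if_neg h2, ih]
          have hadd : qc + 1 + hpgQuotes ts = qc + (1 + hpgQuotes ts) := by omega
          simp [h1, h2, hadd]
        · simp [h1, h2, h3, ih]

-- the existential form equals B's length/2 check
theorem hpgAlt_ex_iff (ps : List String) :
    (∃ k, ps = hpgAlt k) ↔ ps = hpgAlt (ps.length / 2) := by
  constructor
  · rintro ⟨k, rfl⟩
    rw [hpgAlt_length]
    congr 1
    omega
  · intro h; exact ⟨_, h⟩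

-- ===== VERDICT (by name: the statement is the Claim_ definition above) =====
theorem has_poor_grammar_spec : Claim_equal_has_poor_grammar := by
  intro ts _
  unfold Spec_has_poor_grammar has_poor_grammar has_poor_grammar_alt
  rw [hpgLoopA_spec]
  have hfold := hpgFold_spec ts [] 0
  simp only [List.nil_append, Nat.zero_add] at hfold
  simp only [hfold, Nat.zero_add]
  have hacc := (hpgAcc_false_iff (hpgParens ts) (hpgParens_mem ts)).1
  have hex := hpgAlt_ex_iff (hpgParens ts)
  cases hA : hpgAcc false (hpgParens ts) with
  | false =>
    have hne : hpgParens ts ≠ (List.replicate ((hpgParens ts).length / 2) ["(", ")"]).flatten := by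
      intro h
      have : hpgAcc false (hpgParens ts) = true := hacc.mpr (hex.mpr (by simpa [hpgAlt] using h))
      simp [hA] at this
    rw [decide_eq_true hne]
    simp
  | true =>
    have heq : hpgParens ts = (List.replicate ((hpgParens ts).length / 2) ["(", ")"]).flatten := by
      have := hex.mp (hacc.mp hA)
      simpa [hpgAlt] using this
    rw [decide_eq_false (not_not_intro heq)]
    simp
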